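-- pv_equiv track=rewrite | github.com/Luci-qq/AOIS_labs | lab2&3/lab3.py | find_excess
-- ===== SOURCE A (Python) =====
-- def find_excess(expression, res):
--     excess = []
--     matches = []
--     timer = [0] * len(expression)
--
--     for i in range(len(res)):
--         intersectionString = []
--         for j in range(len(expression)):
--             times = 0
--             for k in range(len(res[i])):
--                 if res[i][k] in expression[j]:
--                     times += 1
--             if times == len(res[i]):
--                 intersectionString.append(j)
--                 timer[j] += 1
--         matches.append(intersectionString)
--
--     for i in range(len(matches)):
--         times = 0
--         for k in range(len(matches[i])):
--             if timer[matches[i][k]] >= 2: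
--                 times += 1
--         if times == len(matches[i]):
--             excess.append(res[i])
--
--     return (excess, matches)
-- ===== SOURCE B (Python) =====
-- def find_excess(expression, res):
--     n = len(expression)
--     # inverted index: character -> set of term indices whose expression[j] contains it
--     index = {}
--     for j, term in enumerate(expression):
--         for c in set(term):
--             index.setdefault(c, set()).add(j)
--     full = set(range(n))
--     matches = []
--     for r in res:
--         covering = full
--         for c in r:
--             covering = covering & index.get(c, set())
--         matches.append(sorted(covering))
--     counts = {}
--     for row in matches:
--         for j in row:
--             counts[j] = counts.get(j, 0) + 1
--     excess = [r for r, row in zip(res, matches)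
--               if all(counts[j] >= 2 for j in row)]
--     return (excess, matches)
-- ===== Notes on version B (the rewrite author's own statement) =====
-- stated objective: faster
-- what changed: B replaces A's triple nested scan (every implicant x every term x every character, plus an in-loop timer array) by an inverted character-to-term-index map built once, per-implicant set intersections over that map, and coverage counts derived afterwards from the match rows.
import Mathlib
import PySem

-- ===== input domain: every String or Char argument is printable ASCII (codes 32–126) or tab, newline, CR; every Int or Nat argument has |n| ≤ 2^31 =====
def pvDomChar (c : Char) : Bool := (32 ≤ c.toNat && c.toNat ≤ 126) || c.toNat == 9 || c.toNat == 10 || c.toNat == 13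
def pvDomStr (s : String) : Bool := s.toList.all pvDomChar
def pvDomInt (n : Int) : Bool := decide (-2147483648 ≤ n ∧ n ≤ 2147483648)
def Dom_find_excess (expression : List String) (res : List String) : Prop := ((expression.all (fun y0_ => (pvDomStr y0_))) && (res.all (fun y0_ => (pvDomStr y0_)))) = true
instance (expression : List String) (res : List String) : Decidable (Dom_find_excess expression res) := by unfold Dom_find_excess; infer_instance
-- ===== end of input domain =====

-- B replaces A's cubic scan per (term, implicant) pair by an inverted character→term-index
-- map intersected per implicant, and derives the coverage counts from the match rows (alternative structure).

-- ===== PORT A =====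
-- one row of A's first loop: for j in range(len(expression)) building (intersectionString, timer);
-- indices j are always in range, so `timer[j] += 1` is ported with List.set / List.getD at j.
def pvStepA (expression : List String) (r : String)
    (acc : List Int × List (List Int)) : List Int × List (List Int) :=
  let z := (List.range expression.length).foldl
      (fun (q : List Int × List Int) j =>
        let times := r.toList.foldl (fun t c =>
            if (expression.getD j "").toList.contains c then t + 1 else t) (0 : Int)
        if times = (r.toList.length : Int) then
          (q.1 ++ [(j : Int)], q.2.set j (q.2.getD j 0 + 1))
        else q)
      ([], acc.1)
  (z.2, acc.2 ++ [z.1])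

def find_excess (expression : List String) (res : List String) : List String × List (List Int) :=
  let st := res.foldl (fun acc r => pvStepA expression r acc)
      (List.replicate expression.length (0 : Int), [])
  let timer := st.1
  let matchRows := st.2
  -- second loop: the indices stored in matches are casts of j < len(expression), hence ≥ 0:
  -- `timer[matches[i][k]]` is ported with .toNat / List.getD.
  let excess := (List.range matchRows.length).foldl (fun exc i =>
      let row := matchRows.getD i []
      let times := row.foldl (fun t j =>
          if (2 : Int) ≤ timer.getD j.toNat 0 then t + 1 else t) (0 : Int)
      if times = (row.length : Int) then exc ++ [res.getD i ""] else exc) []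
  (excess, matchRows)

-- ===== PORT B =====
-- inverted index: for j, term in enumerate(expression): for c in set(term): index.setdefault(c, set()).add(j)
def pvIndexB (expression : List String) : PySem.Dict Char (PySem.Set Int) :=
  (PySem.List.enumerate expression 0).foldl
    (fun d p => (PySem.Set.ofList p.2.toList).foldl
        (fun d c => d.modify c PySem.Set.empty (fun s => PySem.Set.add s p.1)) d)
    PySem.Dict.empty

def find_excess_alt (expression : List String) (res : List String) : List String × List (List Int) :=
  let index := pvIndexB expression
  let full : PySem.Set Int := PySem.Set.ofList (PySem.List.pyRange 0 (expression.length : Int))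
  let matchRows := res.map (fun r =>
      PySem.List.sorted
        (r.toList.foldl (fun cov c => PySem.Set.inter cov (index.getD c PySem.Set.empty)) full)
        (fun x => x))
  let counts := matchRows.foldl (fun d row => row.foldl (fun d j => d.modify j 0 (· + 1)) d)
      (PySem.Dict.empty : PySem.Dict Int Int)
  let excess := (res.zip matchRows).foldl (fun exc p =>
      if p.2.all (fun j => decide ((2 : Int) ≤ counts.getD j 0)) then exc ++ [p.1] else exc) []
  (excess, matchRows)

-- ===== PRECONDITION & SPEC =====
def Spec_find_excess (expression : List String) (res : List String) (out : List String × List (List Int)) : Prop := out = find_excess_alt expression res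
instance (expression : List String) (res : List String) (out : List String × List (List Int)) : Decidable (Spec_find_excess expression res out) := by unfold Spec_find_excess; infer_instance

-- ===== CLAIM (what is proved, stated in full; the proofs are below) =====
def Claim_equal_find_excess : Prop := ∀ (expression : List String) (res : List String), Dom_find_excess expression res → Spec_find_excess expression res (find_excess expression res)

-- ===== LEMMAS AND PROOFS =====

-- c occurs in the j-th term
def pvQ (es : List String) (c : Char) (j : Nat) : Bool := (es.getD j "").toList.contains c
-- every character of r occurs in the j-th term
def pvCov (es : List String) (r : String) (j : Nat) : Bool := r.toList.all (fun c => pvQ es c j)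
-- the row A and B both compute for implicant r
def pvRow (es : List String) (r : String) : List Int :=
  ((List.range es.length).filter (pvCov es r)).map Int.ofNat
-- how many implicants of res are covered by term j
def pvCnt (res : List String) (es : List String) (j : Nat) : Nat :=
  (res.filter (fun r => pvCov es r j)).length

theorem pvRow_nodup (es : List String) (r : String) : (pvRow es r).Nodup := by
  unfold pvRow
  exact ((List.nodup_range).filter _).map (fun a b h => by simpa using h)

theorem pvMem_row (es : List String) (r : String) (v : Int) :
    v ∈ pvRow es r ↔ ∃ j : Nat, j < es.length ∧ pvCov es r j ∧ v = (j : Int) := by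
  unfold pvRow
  simp only [List.mem_map, List.mem_filter, List.mem_range]
  constructor
  · rintro ⟨j, ⟨hj, hc⟩, rfl⟩; exact ⟨j, hj, hc, rfl⟩
  · rintro ⟨j, hj, hc, rfl⟩; exact ⟨j, ⟨hj, hc⟩, rfl⟩


theorem pvGetD_set (t : List Int) (i j : Nat) (v : Int) :
    (t.set i v).getD j 0 = if i = j ∧ i < t.length then v else t.getD j 0 := by
  simp only [List.getD_eq_getElem?_getD, List.getElem?_set]
  by_cases h1 : i = j
  · subst h1
    by_cases h2 : i < t.length
    · simp [h2]
    · simp [h2]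
  · simp [h1]

-- bump: effect of incrementing the timer at each index of js
theorem pvBump_getD (js : List Nat) : ∀ (t : List Int), js.Nodup →
    (∀ i ∈ js, i < t.length) → ∀ (j : Nat),
    (js.foldl (fun t i => t.set i (t.getD i 0 + 1)) t).getD j 0
      = t.getD j 0 + (if j ∈ js then 1 else 0) := by
  induction js with
  | nil => intro t _ _ j; simp
  | cons i js ih =>
    intro t hnd hlt j
    simp only [List.foldl_cons]
    have hnd' := hnd.of_cons
    have hlen : (t.set i (t.getD i 0 + 1)).length = t.length := by simp
    rw [ih _ hnd' (fun x hx => by rw [hlen]; exact hlt x (List.mem_cons_of_mem _ hx)) j]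
    rw [pvGetD_set]
    by_cases hji : j = i
    · subst hji
      have : j ∉ js := (List.nodup_cons.mp hnd).1
      simp [this, hlt j List.mem_cons_self]
    · rw [if_neg (fun h => hji h.1.symm)]; simp [List.mem_cons, hji]

theorem pvBump_length (js : List Nat) : ∀ (t : List Int),
    (js.foldl (fun t i => t.set i (t.getD i 0 + 1)) t).length = t.length := by
  induction js with
  | nil => intro t; rfl
  | cons i js ih => intro t; rw [List.foldl_cons, ih, List.length_set]

-- A's inner loop over j: the pair (intersectionString, timer) it produces
theorem pvInnerA (es : List String) (r : String) (js : List Nat) (acc : List Int) (t : List Int) :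
    js.foldl (fun (q : List Int × List Int) j =>
        let times := r.toList.foldl (fun t c =>
            if (es.getD j "").toList.contains c then t + 1 else t) (0 : Int)
        if times = (r.toList.length : Int) then
          (q.1 ++ [(j : Int)], q.2.set j (q.2.getD j 0 + 1))
        else q) (acc, t)
      = (acc ++ (js.filter (pvCov es r)).map Int.ofNat,
         (js.filter (pvCov es r)).foldl (fun t i => t.set i (t.getD i 0 + 1)) t) := by
  induction js generalizing acc t with
  | nil => simp
  | cons j js ih =>
    simp only [List.foldl_cons, List.filter_cons]
    have hcnt : r.toList.foldl (fun t c =>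
        if (es.getD j "").toList.contains c then t + 1 else t) (0 : Int)
        = (List.countP (fun c => (es.getD j "").toList.contains c) r.toList : Int) := by
      simpa using PySem.List.foldl_count_if (fun c => (es.getD j "").toList.contains c) r.toList 0
    have hiff : (r.toList.foldl (fun t c =>
        if (es.getD j "").toList.contains c then t + 1 else t) (0 : Int)
          = (r.toList.length : Int)) ↔ pvCov es r j = true := by
      rw [hcnt]
      unfold pvCov pvQ
      rw [Int.natCast_inj, List.countP_eq_length_filter, List.length_filter_eq_length_iff]
      simp [List.all_eq_true]
    by_cases hc : pvCov es r j = true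
    · simp only [hc, if_pos (hiff.mpr hc), if_pos trivial]
      rw [ih]
      simp
    · have : ¬ (r.toList.foldl (fun t c =>
          if (es.getD j "").toList.contains c then t + 1 else t) (0 : Int)
            = (r.toList.length : Int)) := fun h => hc (hiff.mp h)
      simp only [if_neg this, hc]
      rw [ih]
      simp

-- A's first loop over res: matches = res.map (pvRow es), timer counts coverage
theorem pvPass1 (es : List String) (res : List String) :
    ∀ (t : List Int) (ms : List (List Int)), t.length = es.length →
    (res.foldl (fun acc r => pvStepA es r acc) (t, ms)).2 = ms ++ res.map (pvRow es)
    ∧ (res.foldl (fun acc r => pvStepA es r acc) (t, ms)).1.length = es.length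
    ∧ ∀ j : Nat, j < es.length → (res.foldl (fun acc r => pvStepA es r acc) (t, ms)).1.getD j 0
        = t.getD j 0 + (pvCnt res es j : Int) := by
  induction res with
  | nil => intro t ms ht; simp [pvCnt, ht]
  | cons r res ih =>
    intro t ms ht
    simp only [List.foldl_cons]
    have hstep : pvStepA es r (t, ms)
        = ((((List.range es.length).filter (pvCov es r)).foldl
              (fun t i => t.set i (t.getD i 0 + 1)) t),
           ms ++ [pvRow es r]) := by
      unfold pvStepA
      rw [pvInnerA]
      rfl
    rw [hstep]
    have hlen : (((List.range es.length).filter (pvCov es r)).foldl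
        (fun t i => t.set i (t.getD i 0 + 1)) t).length = es.length := by
      rw [pvBump_length, ht]
    obtain ⟨h1, h2, h3⟩ := ih _ (ms ++ [pvRow es r]) hlen
    refine ⟨by simpa using h1, h2, ?_⟩
    intro j hjlt
    rw [h3 j hjlt]
    rw [pvBump_getD _ _ ((List.nodup_range).filter _)
        (fun i hi => by rw [ht]; exact List.mem_range.mp (List.mem_filter.mp hi).1)]
    have hmem : (j ∈ (List.range es.length).filter (pvCov es r))
        ↔ (j < es.length ∧ pvCov es r j = true) := by
      simp [List.mem_filter]
    unfold pvCnt
    by_cases hc2 : pvCov es r j = true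
    · rw [if_pos (hmem.mpr ⟨hjlt, hc2⟩)]
      simp only [List.filter_cons, hc2, if_pos trivial, List.length_cons]
      push_cast; ring
    · rw [if_neg (fun h => hc2 (hmem.mp h).2)]
      simp only [List.filter_cons, Bool.eq_false_iff.mpr hc2]
      push_cast; ring

-- fold over range(len xs) reading xs.getD = fold over xs
theorem pvFold_range_getD {α β : Type} (xs : List α) (d : α) (h : β → α → β) (a : β) :
    (List.range xs.length).foldl (fun acc i => h acc (xs.getD i d)) a = xs.foldl h a := by
  induction xs using List.reverseRecOn generalizing a with
  | nil => simp
  | append_singleton xs x ih =>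
    have hlen : (xs ++ [x]).length = xs.length + 1 := by simp
    rw [hlen, List.range_succ, List.foldl_append, List.foldl_append]
    have h1 : (List.range xs.length).foldl (fun acc i => h acc ((xs ++ [x]).getD i d)) a
        = (List.range xs.length).foldl (fun acc i => h acc (xs.getD i d)) a := by
      apply PySem.List.foldl_congr_mem
      intro acc i hi
      rw [List.getD_append _ _ _ _ (List.mem_range.mp hi)]
    rw [h1, ih]
    simp [List.getD_eq_getElem?_getD]

-- ===== B-side lemmas =====

-- effect of the inner char loop of pvIndexB on one entry
theorem pvCharFold (cs : List Char) (d : PySem.Dict Char (PySem.Set Int)) (jv : Int) (c : Char) :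
    ((cs.foldl (fun d c' => d.modify c' PySem.Set.empty (fun s => PySem.Set.add s jv)) d).getD c PySem.Set.empty)
      = if c ∈ cs then PySem.Set.add (d.getD c PySem.Set.empty) jv else d.getD c PySem.Set.empty := by
  induction cs generalizing d with
  | nil => simp
  | cons c' cs ih =>
    simp only [List.foldl_cons, ih, PySem.Dict.getD_modify, List.mem_cons]
    by_cases h1 : c ∈ cs <;> by_cases h2 : c = c'
    · simp [h2]
    · simp [h1, h2]
    · simp [h2]
    · simp [h1, h2]

theorem pvQ_append (es : List String) (e : String) (c : Char) (j : Nat) (hj : j < es.length) :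
    pvQ (es ++ [e]) c j = pvQ es c j := by
  unfold pvQ; rw [List.getD_append _ _ _ _ hj]

-- the index entry for c is exactly the (cast) filter of range
theorem pvIndex_getD (es : List String) (c : Char) :
    (pvIndexB es).getD c PySem.Set.empty
      = ((List.range es.length).filter (fun j => pvQ es c j)).map Int.ofNat := by
  unfold pvIndexB
  induction es using List.reverseRecOn with
  | nil => simp [PySem.List.enumerate]
  | append_singleton es e ih =>
    rw [PySem.List.enumerate_append, List.foldl_append]
    have henum : PySem.List.enumerate [e] (0 + (es.length : Int)) = [((es.length : Int), e)] := by
      simp [PySem.List.enumerate]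
    rw [henum, List.foldl_cons, List.foldl_nil, pvCharFold, ih]
    have hlen : (es ++ [e]).length = es.length + 1 := by simp
    have hQtop : pvQ (es ++ [e]) c es.length = e.toList.contains c := by
      unfold pvQ
      simp [List.getD_eq_getElem?_getD]
    have hfilt : (List.range es.length).filter (fun j => pvQ (es ++ [e]) c j)
        = (List.range es.length).filter (fun j => pvQ es c j) :=
      List.filter_congr (fun j hj => pvQ_append es e c j (List.mem_range.mp hj))
    rw [hlen, List.range_succ, List.filter_append, List.map_append, hfilt]
    by_cases hc : c ∈ e.toList
    · rw [if_pos ((PySem.Set.mem_ofList _ _).mpr hc)]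
      have hQt : pvQ (es ++ [e]) c es.length = true := by
        rw [hQtop]; exact List.contains_iff_mem.mpr hc
      have hnotmem : ((es.length : Int)) ∉
          ((List.range es.length).filter (fun j => pvQ es c j)).map Int.ofNat := by
        simp only [List.mem_map, List.mem_filter, List.mem_range]
        rintro ⟨j, ⟨hj, -⟩, hje⟩
        exact absurd (Int.ofNat_inj.mp hje) (by omega)
      rw [PySem.Set.add, if_neg (by
        simp only [PySem.Set.contains, Bool.not_eq_true]
        exact Bool.eq_false_iff.mpr (fun h => hnotmem (List.contains_iff_mem.mp h)))]
      simp [hQt]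
    · rw [if_neg (fun h => hc ((PySem.Set.mem_ofList _ _).mp h))]
      have hQt : pvQ (es ++ [e]) c es.length = false := by
        rw [hQtop]
        exact Bool.eq_false_iff.mpr (fun h => hc (List.contains_iff_mem.mp h))
      simp [hQt]

theorem pvInterFold (index : PySem.Dict Char (PySem.Set Int)) (cs : List Char) (cov : List Int) :
    cs.foldl (fun cov c => PySem.Set.inter cov (index.getD c PySem.Set.empty)) cov
      = cov.filter (fun j => cs.all (fun c => (index.getD c PySem.Set.empty).contains j)) := by
  induction cs generalizing cov with
  | nil => simp
  | cons c cs ih =>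
    rw [List.foldl_cons, ih]
    simp only [PySem.Set.inter]
    rw [List.filter_filter]
    apply List.filter_congr
    intro j _
    simp [List.all_cons, Bool.and_comm]

theorem pvPyRange_eq (n : Nat) : PySem.List.pyRange 0 (n : Int) = (List.range n).map Int.ofNat := by
  rw [PySem.List.pyRange]
  rcases Nat.eq_zero_or_pos n with h | h
  · subst h; simp
  · rw [if_neg one_ne_zero]
    have h0 : (0 : Int) < (n : Int) := by exact_mod_cast h
    rw [if_pos h0]
    have : (((n : Int) - 0 + 1 - 1) / 1).toNat = n := by
      simp
    rw [this]
    apply List.map_congr_left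
    intro k _
    simp

-- B's covering computation yields pvRow
theorem pvCovering (es : List String) (r : String) :
    PySem.List.sorted
      (r.toList.foldl (fun cov c => PySem.Set.inter cov ((pvIndexB es).getD c PySem.Set.empty))
        (PySem.Set.ofList (PySem.List.pyRange 0 (es.length : Int))))
      (fun x => x)
    = pvRow es r := by
  have hnodup : ((List.range es.length).map Int.ofNat).Nodup :=
    List.nodup_range.map (fun a b h => Int.ofNat_inj.mp h)
  rw [pvPyRange_eq, PySem.Set.ofList_eq_self_of_nodup _ hnodup, pvInterFold, List.filter_map]
  have hpred : ∀ j ∈ List.range es.length,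
      ((fun j => r.toList.all (fun c => ((pvIndexB es).getD c PySem.Set.empty).contains j)) ∘ Int.ofNat) j
        = pvCov es r j := by
    intro j hj
    have hjlt := List.mem_range.mp hj
    unfold pvCov
    simp only [Function.comp_apply]
    rw [Bool.eq_iff_iff, List.all_eq_true, List.all_eq_true]
    constructor
    · intro h c hc
      have := (PySem.Set.contains_iff _ _).mp (h c hc)
      rw [pvIndex_getD] at this
      simp only [List.mem_map, List.mem_filter, List.mem_range] at this
      obtain ⟨j', ⟨-, hq⟩, hje⟩ := this
      rwa [← Int.ofNat_inj.mp hje]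
    · intro h c hc
      apply (PySem.Set.contains_iff _ _).mpr
      rw [pvIndex_getD]
      simp only [List.mem_map, List.mem_filter, List.mem_range]
      exact ⟨j, ⟨hjlt, h c hc⟩, rfl⟩
  rw [List.filter_congr hpred]
  apply PySem.List.sorted_eq_self_of_pairwise
  have : ((List.range es.length).filter (pvCov es r)).Pairwise (· < ·) :=
    List.pairwise_lt_range.filter _
  rw [List.pairwise_map]
  exact (this.imp (fun {a b} h => by
    have : (a : Int) < (b : Int) := by exact_mod_cast h
    exact Int.le_of_lt this))

-- B's counts dict: getD = number of rows containing the index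
theorem pvCounts (rows : List (List Int)) (d : PySem.Dict Int Int) (v : Int) :
    (rows.foldl (fun d row => row.foldl (fun d j => d.modify j 0 (· + 1)) d) d).getD v 0
      = d.getD v 0 + ((rows.map (fun row => row.count v)).sum : Int) := by
  induction rows generalizing d with
  | nil => simp
  | cons row rows ih =>
    simp only [List.foldl_cons, ih, PySem.Dict.getD_foldl_modify_add_one, List.map_cons, List.sum_cons]
    ring

theorem pvSum_count (es : List String) (res : List String) (j : Nat) (hj : j < es.length) :
    ((res.map (pvRow es)).map (fun row => row.count (Int.ofNat j))).sum = pvCnt res es j := by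
  induction res with
  | nil => simp [pvCnt]
  | cons r res ih =>
    simp only [List.map_cons, List.sum_cons]
    rw [ih]
    unfold pvCnt
    by_cases hc : pvCov es r j = true
    · have hmem : Int.ofNat j ∈ pvRow es r := (pvMem_row es r _).mpr ⟨j, hj, hc, rfl⟩
      rw [List.count_eq_one_of_mem (pvRow_nodup es r) hmem]
      simp [hc]
      omega
    · have hnm : Int.ofNat j ∉ pvRow es r := by
        intro h
        obtain ⟨j', hlt, hcov, hje⟩ := (pvMem_row es r _).mp h
        rw [← Int.ofNat_inj.mp hje] at hcov
        exact hc hcov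
      rw [List.count_eq_zero_of_not_mem hnm]
      simp [Bool.eq_false_iff.mpr hc]

theorem pvMain (es res : List String) : find_excess es res = find_excess_alt es res := by
  obtain ⟨hM, hTlen, hT⟩ :=
    pvPass1 es res (List.replicate es.length 0) [] (by simp)
  simp only [find_excess, find_excess_alt]
  -- the two match lists coincide
  have hMB : res.map (fun r =>
      PySem.List.sorted
        (r.toList.foldl (fun cov c => PySem.Set.inter cov ((pvIndexB es).getD c PySem.Set.empty))
          (PySem.Set.ofList (PySem.List.pyRange 0 (es.length : Int))))
        (fun x => x)) = res.map (pvRow es) :=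
    List.map_congr_left (fun r _ => pvCovering es r)
  rw [hM, hMB]
  simp only [List.nil_append]
  -- abbreviations
  set timer := (res.foldl (fun acc r => pvStepA es r acc) (List.replicate es.length 0, [])).1 with htimer
  set counts := ((res.map (pvRow es)).foldl
      (fun d row => row.foldl (fun d j => d.modify j 0 (· + 1)) d)
      (PySem.Dict.empty : PySem.Dict Int Int)) with hcounts
  -- the two per-implicant conditions agree
  have hpt : ∀ (r : String), ∀ j ∈ pvRow es r,
      decide ((2 : Int) ≤ timer.getD j.toNat 0) = decide ((2 : Int) ≤ counts.getD j 0) := by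
    intro r j hjm
    obtain ⟨j', hlt, hcov, rfl⟩ := (pvMem_row es r _).mp hjm
    have h1 : timer.getD ((j' : Int)).toNat 0 = (pvCnt res es j' : Int) := by
      rw [htimer, Int.toNat_natCast, hT j' hlt, List.getD_replicate _ hlt]
      ring
    have h2 : counts.getD (j' : Int) 0 = (pvCnt res es j' : Int) := by
      rw [hcounts, pvCounts, PySem.Dict.getD_empty, zero_add,
        ← pvSum_count es res j' hlt, Nat.cast_list_sum, List.map_map, List.map_map]
      simp [Function.comp_def]
    rw [h1, h2]
  have hcond : ∀ (r : String),
      ((pvRow es r).foldl (fun t j => if (2 : Int) ≤ timer.getD j.toNat 0 then t + 1 else t) (0 : Int)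
          = ((pvRow es r).length : Int))
        = ((pvRow es r).all (fun j => decide ((2 : Int) ≤ counts.getD j 0)) = true) := by
    intro r
    have hcnt : (pvRow es r).foldl (fun t j => if (2 : Int) ≤ timer.getD j.toNat 0 then t + 1 else t) (0 : Int)
        = ((pvRow es r).countP (fun j => decide ((2 : Int) ≤ timer.getD j.toNat 0)) : Int) := by
      have := PySem.List.foldl_count_if (fun j => decide ((2 : Int) ≤ timer.getD j.toNat 0)) (pvRow es r) 0
      simpa using this
    rw [hcnt]
    apply propext
    rw [Int.natCast_inj, List.countP_eq_length_filter, List.length_filter_eq_length_iff, List.all_eq_true]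
    constructor
    · intro h j hj
      rw [← hpt r j hj]; exact h j hj
    · intro h j hj
      rw [hpt r j hj]; exact h j hj
  -- fold over range(len) reading getD = fold over the zipped list
  have hziplen : (res.zip (res.map (pvRow es))).length = res.length := by simp
  have hzip : ∀ (l : List String), l.zip (l.map (pvRow es)) = l.map (fun r => (r, pvRow es r)) := by
    intro l
    induction l with
    | nil => rfl
    | cons x xs ih => simp [ih]
  have hfun : (fun (exc : List String) (i : Nat) =>
        if ((res.map (pvRow es)).getD i []).foldl
              (fun t j => if (2 : Int) ≤ timer.getD j.toNat 0 then t + 1 else t) (0 : Int)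
            = (((res.map (pvRow es)).getD i []).length : Int)
        then exc ++ [res.getD i ""] else exc) = (fun exc i =>
          (fun (exc : List String) (p : String × List Int) =>
            if p.2.foldl (fun t j => if (2 : Int) ≤ timer.getD j.toNat 0 then t + 1 else t) (0 : Int)
                = (p.2.length : Int)
            then exc ++ [p.1] else exc) exc ((res.map (fun r => (r, pvRow es r))).getD i ("", []))) := by
    funext exc i
    by_cases hi : i < res.length
    · simp [List.getD_eq_getElem?_getD, List.getElem?_map, List.getElem?_eq_getElem hi]
    · have h1 : (res.map (pvRow es))[i]? = none := by
        simp; omega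
      have h2 : (res.map (fun r => (r, pvRow es r)))[i]? = none := by
        simp; omega
      have h3 : res[i]? = none := by
        simp; omega
      simp [List.getD_eq_getElem?_getD, h1, h2, h3]
  have hA : (List.range (res.map (pvRow es)).length).foldl (fun exc i =>
        if ((res.map (pvRow es)).getD i []).foldl
              (fun t j => if (2 : Int) ≤ timer.getD j.toNat 0 then t + 1 else t) (0 : Int)
            = (((res.map (pvRow es)).getD i []).length : Int)
        then exc ++ [res.getD i ""] else exc) []
      = res.foldl (fun exc r =>
          if (pvRow es r).foldl (fun t j => if (2 : Int) ≤ timer.getD j.toNat 0 then t + 1 else t) (0 : Int)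
              = ((pvRow es r).length : Int)
          then exc ++ [r] else exc) [] := by
    have hlen' : (res.map (pvRow es)).length = (res.map (fun r => (r, pvRow es r))).length := by simp
    rw [hlen', hfun]
    have hgen := pvFold_range_getD (res.map (fun r => (r, pvRow es r))) ("", ([] : List Int))
      (fun (exc : List String) (p : String × List Int) =>
        if p.2.foldl (fun t j => if (2 : Int) ≤ timer.getD j.toNat 0 then t + 1 else t) (0 : Int)
            = (p.2.length : Int)
        then exc ++ [p.1] else exc) []
    rw [hgen]
    simp only [List.foldl_map]
  have hBfold : (res.zip (res.map (pvRow es))).foldl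
      (fun exc p => if p.2.all (fun j => decide ((2 : Int) ≤ counts.getD j 0)) = true
        then exc ++ [p.1] else exc) []
      = res.foldl (fun exc r => if (pvRow es r).all (fun j => decide ((2 : Int) ≤ counts.getD j 0)) = true
        then exc ++ [r] else exc) [] := by
    rw [hzip res]
    simp only [List.foldl_map]
  have hfinal : res.foldl (fun exc r =>
        if (pvRow es r).foldl (fun t j => if (2 : Int) ≤ timer.getD j.toNat 0 then t + 1 else t) (0 : Int)
            = ((pvRow es r).length : Int)
        then exc ++ [r] else exc) []
      = res.foldl (fun exc r =>
        if (pvRow es r).all (fun j => decide ((2 : Int) ≤ counts.getD j 0)) = true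
        then exc ++ [r] else exc) [] := by
    apply PySem.List.foldl_congr_mem
    intro acc r _
    exact if_congr (iff_of_eq (hcond r)) rfl rfl
  exact congrArg (fun l => (l, res.map (pvRow es))) (hA.trans (hfinal.trans hBfold.symm))

-- ===== VERDICT (by name: the statement is the Claim_ definition above) =====
theorem find_excess_spec : Claim_equal_find_excess := by
  intro es res _
  unfold Spec_find_excess
  exact pvMain es res
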